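-- pv_equiv track=rewrite | github.com/groking122/poe-dashboard | poe_dashboard.py | price_confidence
-- ===== SOURCE A (Python) =====
-- def price_confidence(listings, spark_data):
--     """Rate price confidence 0-100 based on listing count and data quality."""
--     if listings <= 1:
--         return 10
--     elif listings <= 3:
--         return 25
--     elif listings <= 5:
--         return 40
--     elif listings <= 10:
--         return 55
--     elif listings <= 20:
--         return 70
--     elif listings <= 50:
--         return 85
--     else:
--         conf = 95
--     # Penalize if sparkline has gaps (stale data)
--     if spark_data:
--         zeroes = sum(1 for v in spark_data if v == 0 or v is None)
--         if zeroes > len(spark_data) * 0.5: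
--             conf = max(conf - 20, 10)
--     return conf
-- ===== SOURCE B (Python) =====
-- import bisect
--
-- _THRESHOLDS = [1, 3, 5, 10, 20, 50]
-- _CONFIDENCE = [10, 25, 40, 55, 70, 85]
--
--
-- def price_confidence(listings, spark_data):
--     """Rate price confidence 0-100 based on listing count and data quality."""
--     i = bisect.bisect_left(_THRESHOLDS, listings)
--     if i < len(_THRESHOLDS):
--         return _CONFIDENCE[i]
--     # top bucket only: penalize if the sparkline is mostly gaps (stale data)
--     conf = 95
--     if spark_data and 2 * sum(v == 0 or v is None for v in spark_data) > len(spark_data):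
--         conf = max(conf - 20, 10)
--     return conf
-- ===== Notes on version B (the rewrite author's own statement) =====
-- stated objective: idiomatic
-- what changed: Replaces the six-way if/elif cascade with a binary-search lookup (bisect.bisect_left) over a sorted threshold table paired with a confidence table; only an index past the table falls through to the 95-with-stale-penalty branch.
import Mathlib
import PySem

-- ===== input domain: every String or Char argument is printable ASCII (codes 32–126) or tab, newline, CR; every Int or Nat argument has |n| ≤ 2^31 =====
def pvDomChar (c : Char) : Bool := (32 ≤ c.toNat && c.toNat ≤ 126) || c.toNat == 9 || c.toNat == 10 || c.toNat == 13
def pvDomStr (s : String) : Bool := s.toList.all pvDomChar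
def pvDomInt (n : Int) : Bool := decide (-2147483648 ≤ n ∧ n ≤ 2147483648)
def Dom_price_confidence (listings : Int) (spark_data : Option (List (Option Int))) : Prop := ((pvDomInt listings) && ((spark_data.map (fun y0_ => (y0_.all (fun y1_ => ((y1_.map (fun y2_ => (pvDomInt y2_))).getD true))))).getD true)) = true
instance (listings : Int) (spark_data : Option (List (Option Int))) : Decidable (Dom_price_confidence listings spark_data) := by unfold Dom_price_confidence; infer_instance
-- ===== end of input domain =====

-- B replaces A's if/elif threshold cascade by a bisect_left lookup in a sorted threshold/confidence table (idiomatic; same behaviour).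
-- ===== PORT A =====
def price_confidence (listings : Int) (spark_data : Option (List (Option Int))) : Int :=
  if listings ≤ 1 then 10
  else if listings ≤ 3 then 25
  else if listings ≤ 5 then 40
  else if listings ≤ 10 then 55
  else if listings ≤ 20 then 70
  else if listings ≤ 50 then 85
  else
    let conf : Int := 95
    -- `if spark_data:` is true iff spark_data is a non-empty list
    match spark_data with
    | none => conf
    | some l =>
      if l ≠ [] then
        -- sum(1 for v in spark_data if v == 0 or v is None)
        let zeroes : Int := l.foldl (fun acc v => if v == some 0 || v == none then acc + 1 else acc) 0
        -- `zeroes > len * 0.5` is exact as `2 * zeroes > len` on integers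
        if 2 * zeroes > (l.length : Int) then max (conf - 20) 10 else conf
      else conf

-- ===== PORT B =====
-- B: binary-search table lookup; bisect.bisect_left is PySem.List.bisectLeft
def price_confidence_alt (listings : Int) (spark_data : Option (List (Option Int))) : Int :=
  let thresholds : List Int := [1, 3, 5, 10, 20, 50]
  let confidence : List Int := [10, 25, 40, 55, 70, 85]
  let i := PySem.List.bisectLeft thresholds listings
  if i < thresholds.length then confidence.getD i 0
  else
    let conf : Int := 95
    -- `2 * sum(v == 0 or v is None for v in spark_data) > len(spark_data)` (and truthiness of spark_data)
    match spark_data with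
    | none => conf
    | some l =>
      if l ≠ [] ∧ 2 * ((l.countP (fun v => v == some 0 || v == none) : Int)) > (l.length : Int)
      then max (conf - 20) 10 else conf

-- ===== PRECONDITION & SPEC =====
def Spec_price_confidence (listings : Int) (spark_data : Option (List (Option Int))) (out : Int) : Prop := out = price_confidence_alt listings spark_data
instance (listings : Int) (spark_data : Option (List (Option Int))) (out : Int) : Decidable (Spec_price_confidence listings spark_data out) := by unfold Spec_price_confidence; infer_instance

-- ===== CLAIM (what is proved, stated in full; the proofs are below) =====
def Claim_equal_price_confidence : Prop := ∀ (listings : Int) (spark_data : Option (List (Option Int))), Dom_price_confidence listings spark_data → Spec_price_confidence listings spark_data (price_confidence listings spark_data)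

-- ===== LEMMAS AND PROOFS =====

-- value of bisect_left on the fixed threshold table, as an if-chain over listings
lemma bl6 (x : Int) : PySem.List.bisectLeft [1, 3, 5, 10, 20, 50] x =
    if x ≤ 1 then 0 else if x ≤ 3 then 1 else if x ≤ 5 then 2 else if x ≤ 10 then 3
    else if x ≤ 20 then 4 else if x ≤ 50 then 5 else 6 := by
  obtain ⟨hlen, hlt, hge⟩ := PySem.List.bisectLeft_spec [1, 3, 5, 10, 20, 50] x (by decide)
  have h0l := hlt 0 (by norm_num); have h0g := hge 0 (by norm_num)
  have h1l := hlt 1 (by norm_num); have h1g := hge 1 (by norm_num)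
  have h2l := hlt 2 (by norm_num); have h2g := hge 2 (by norm_num)
  have h3l := hlt 3 (by norm_num); have h3g := hge 3 (by norm_num)
  have h4l := hlt 4 (by norm_num); have h4g := hge 4 (by norm_num)
  have h5l := hlt 5 (by norm_num); have h5g := hge 5 (by norm_num)
  simp only [List.length_cons, List.length_nil] at hlen
  norm_num at h0l h0g h1l h1g h2l h2g h3l h3g h4l h4g h5l h5g
  split_ifs <;> omega

-- A's 0/1-sum is a countP
lemma zeroes_eq_countP (l : List (Option Int)) :
    l.foldl (fun acc v => if v == some 0 || v == none then acc + 1 else acc) (0 : Int) =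
    ((l.countP (fun v => v == some 0 || v == none) : Int)) := by
  have h : ∀ (s : Int), l.foldl (fun acc v => if v == some 0 || v == none then acc + 1 else acc) s =
      s + ((l.countP (fun v => v == some 0 || v == none) : Int)) := by
    induction l with
    | nil => simp
    | cons a t ih =>
      intro s
      simp only [List.foldl_cons, List.countP_cons, ih]
      split_ifs <;> simp_all <;> ring
  simpa using h 0

-- ===== VERDICT (by name: the statement is the Claim_ definition above) =====
theorem price_confidence_spec : Claim_equal_price_confidence := by
  intro listings spark_data _
  unfold Spec_price_confidence price_confidence price_confidence_alt
  simp only [bl6]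
  by_cases h1 : listings ≤ 1
  · simp [h1]
  by_cases h3 : listings ≤ 3
  · simp [h1, h3]
  by_cases h5 : listings ≤ 5
  · simp [h1, h3, h5]
  by_cases h10 : listings ≤ 10
  · simp [h1, h3, h5, h10]
  by_cases h20 : listings ≤ 20
  · simp [h1, h3, h5, h10, h20]
  by_cases h50 : listings ≤ 50
  · simp [h1, h3, h5, h10, h20, h50]
  simp only [h1, h3, h5, h10, h20, h50, if_false]
  cases spark_data with
  | none => simp
  | some l =>
    cases l with
    | nil => simp
    | cons a t =>
      simp only [zeroes_eq_countP]
      by_cases hg : 2 * (((a :: t).countP (fun v => v == some 0 || v == none) : Int)) > ((a :: t).length : Int) <;> simp [hg]
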